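-- pv_equiv track=rewrite | github.com/dscepop/fafl | 6.py | is_valid_wCwR
-- ===== SOURCE A (Python) =====
-- def is_valid_wCwR(input_str):
--     stack = []
--     i = 0
--     n = len(input_str)
--
--     # Step 1: Push the first part (w) onto stack until 'C'
--     while i < n and input_str[i] != 'C':
--         if input_str[i] not in ('0', '1'):
--             return False
--         stack.append(input_str[i])
--         i += 1
--
--     # Check if 'C' was found
--     if i == n or input_str[i] != 'C':
--         return False
--     i += 1  # Skip the 'C'
--
--     # Step 2: Verify second part matches reverse of first part (wR)
--     while i < n:
--         if input_str[i] not in ('0', '1'):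
--             return False
--         if not stack or stack.pop() != input_str[i]:
--             return False
--         i += 1
--
--     # Step 3: Accept if stack is empty
--     return not stack
-- ===== SOURCE B (Python) =====
-- def is_valid_wCwR(input_str):
--     w, sep, rest = input_str.partition('C')
--     if not sep:
--         return False
--     if any(c not in '01' for c in w) or any(c not in '01' for c in rest):
--         return False
--     return rest == w[::-1]
-- ===== Notes on version B (the rewrite author's own statement) =====
-- stated objective: simpler
-- what changed: Replaces the explicit index/stack push-pop scan with str.partition at the first separator, an alphabet check on both halves, and a reversed-slice equality test.
import Mathlib
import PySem

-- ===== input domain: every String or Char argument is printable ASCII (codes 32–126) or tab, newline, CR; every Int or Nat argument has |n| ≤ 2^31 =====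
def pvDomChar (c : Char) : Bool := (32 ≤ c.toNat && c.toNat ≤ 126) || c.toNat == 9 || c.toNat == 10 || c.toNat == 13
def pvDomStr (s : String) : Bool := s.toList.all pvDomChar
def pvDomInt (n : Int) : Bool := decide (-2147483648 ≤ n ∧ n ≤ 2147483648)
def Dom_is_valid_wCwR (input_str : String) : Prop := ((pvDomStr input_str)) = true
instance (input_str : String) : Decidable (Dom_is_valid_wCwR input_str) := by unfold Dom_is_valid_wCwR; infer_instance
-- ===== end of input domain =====

-- B replaces A's index/stack push-pop scan with str.partition at the first separator plus a reversed-slice comparison (simpler; same cost).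

-- ===== PORT A =====
-- Python's stack.append/pop() (push/pop at the end) is ported as cons/head on a Lean list (the same stack discipline).
-- Step 2 of A: consume the rest, popping the stack; then step 3 checks the stack is empty.
def pvPhase2 (stack : List Char) : List Char → Bool
  | [] => stack.isEmpty
  | c :: cs =>
    if c = '0' ∨ c = '1' then
      match stack with
      | [] => false
      | t :: ts => if t = c then pvPhase2 ts cs else false
    else false

-- Step 1 of A: push chars until 'C' (fail on a non-01 char); at 'C' skip it and run step 2; at end of string fail.
def pvPhase1 (stack : List Char) : List Char → Bool
  | [] => false
  | c :: cs =>
    if c = 'C' then pvPhase2 stack cs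
    else if c = '0' ∨ c = '1' then pvPhase1 (c :: stack) cs
    else false

def is_valid_wCwR (input_str : String) : Bool := pvPhase1 [] input_str.toList

-- ===== PORT B =====
def pvIs01 (c : Char) : Bool := c = '0' || c = '1'

-- w, sep, rest = input_str.partition('C'): takeWhile/dropWhile at the first 'C'.
def is_valid_wCwR_alt (input_str : String) : Bool :=
  let cl := input_str.toList
  let w := cl.takeWhile (· ≠ 'C')
  match cl.dropWhile (· ≠ 'C') with
  | [] => false
  | _ :: rest =>
    if w.any (fun c => !pvIs01 c) || rest.any (fun c => !pvIs01 c) then false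
    else rest == w.reverse

-- ===== PRECONDITION & SPEC =====
def Spec_is_valid_wCwR (input_str : String) (out : Bool) : Prop := out = is_valid_wCwR_alt input_str
instance (input_str : String) (out : Bool) : Decidable (Spec_is_valid_wCwR input_str out) := by unfold Spec_is_valid_wCwR; infer_instance

-- ===== CLAIM (what is proved, stated in full; the proofs are below) =====
def Claim_equal_is_valid_wCwR : Prop := ∀ (input_str : String), Dom_is_valid_wCwR input_str → Spec_is_valid_wCwR input_str (is_valid_wCwR input_str)

-- ===== LEMMAS AND PROOFS =====

theorem pvPhase2_eq (r stack : List Char) (h : stack.all pvIs01 = true) :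
    pvPhase2 stack r = (r == stack) := by
  induction r generalizing stack with
  | nil =>
    cases stack <;> simp [pvPhase2, List.isEmpty]
  | cons c cs ih =>
    cases stack with
    | nil =>
      simp only [pvPhase2]
      split <;> simp
    | cons t ts =>
      simp only [List.all_cons, Bool.and_eq_true] at h
      simp only [pvPhase2]
      by_cases h01 : c = '0' ∨ c = '1'
      · simp only [if_pos h01]
        by_cases htc : t = c
        · subst htc
          simp [ih ts h.2]
        · simp [htc, Ne.symm htc]
      · simp only [if_neg h01]
        have : ¬ t = c := by
          rcases Bool.or_eq_true _ _ |>.mp h.1 with h' | h' <;>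
            simp only [decide_eq_true_eq] at h' <;> subst h' <;>
            intro he <;> exact h01 (by simp [← he])
        simp [this, Ne.symm this]

-- B's core, generalized over the stack already accumulated by A's step 1.
theorem pvPhase1_eq (cl stack : List Char) (h : stack.all pvIs01 = true) :
    pvPhase1 stack cl =
      (match cl.dropWhile (· ≠ 'C') with
       | [] => false
       | _ :: rest =>
         (cl.takeWhile (· ≠ 'C')).all pvIs01 && rest.all pvIs01 &&
           (rest == (cl.takeWhile (· ≠ 'C')).reverse ++ stack)) := by
  induction cl generalizing stack with
  | nil => simp [pvPhase1, List.dropWhile]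
  | cons c cs ih =>
    by_cases hc : c = 'C'
    · subst hc
      simp only [pvPhase1, if_pos rfl, List.dropWhile, List.takeWhile]
      simp only [decide_not, decide_eq_true_eq]
      rw [pvPhase2_eq cs stack h]
      simp only [ne_eq, not_true_eq_false, decide_false, Bool.not_false, Bool.false_eq_true,
        reduceIte, List.all_nil, Bool.true_and, List.reverse_nil, List.nil_append]
      by_cases hcs : cs = stack
      · subst hcs; simp [h]
      · simp [hcs]
    · simp only [pvPhase1, if_neg hc]
      have hdw : (c :: cs).dropWhile (· ≠ 'C') = cs.dropWhile (· ≠ 'C') := by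
        simp [List.dropWhile, hc]
      have htw : (c :: cs).takeWhile (· ≠ 'C') = c :: cs.takeWhile (· ≠ 'C') := by
        simp [List.takeWhile, hc]
      rw [hdw, htw]
      by_cases h01 : c = '0' ∨ c = '1'
      · rw [if_pos h01]
        have hst : (c :: stack).all pvIs01 = true := by
          simp only [List.all_cons, Bool.and_eq_true]
          exact ⟨by rcases h01 with h'|h' <;> simp [pvIs01, h'], h⟩
        rw [ih (c :: stack) hst]
        cases cs.dropWhile (· ≠ 'C') with
        | nil => rfl
        | cons x rest =>
          simp only [List.all_cons, List.reverse_cons, List.append_assoc]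
          have : pvIs01 c = true := by rcases h01 with h'|h' <;> simp [pvIs01, h']
          simp [this]
      · rw [if_neg h01]
        cases hdrop : cs.dropWhile (· ≠ 'C') with
        | nil => rfl
        | cons x rest =>
          have : pvIs01 c = false := by
            simp only [pvIs01, Bool.or_eq_false_iff, decide_eq_false_iff_not]
            exact ⟨fun h' => h01 (Or.inl h'), fun h' => h01 (Or.inr h')⟩
          simp [this]

-- ===== VERDICT (by name: the statement is the Claim_ definition above) =====
theorem is_valid_wCwR_spec : Claim_equal_is_valid_wCwR := by
  unfold Claim_equal_is_valid_wCwR Spec_is_valid_wCwR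
  intro s _
  unfold is_valid_wCwR is_valid_wCwR_alt
  rw [pvPhase1_eq s.toList [] (by simp)]
  cases hdrop : s.toList.dropWhile (· ≠ 'C') with
  | nil => simp only [hdrop]
  | cons x rest =>
    simp only [hdrop, List.append_nil]
    rw [List.all_eq_not_any_not, List.all_eq_not_any_not]
    cases (s.toList.takeWhile (· ≠ 'C')).any (fun c => !pvIs01 c) <;>
      cases rest.any (fun c => !pvIs01 c) <;> simp
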